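-- pv_equiv track=rewrite | github.com/igorvanloo/Project-Euler-Explained | Finished Problems/pe00555 - McCarthy 91 Function.py | S1
-- ===== SOURCE A (Python) =====
-- def prime_factors(n):
--     factors = {}
--     d = 2
--     while n > 1:
--         while n % d == 0:
--             if d in factors:
--                 factors[d] += 1
--             else:
--                 factors[d] = 1
--             n //= d
--         d = d + 1
--         if d * d > n:
--             if n > 1:
--                 n = int(n)
--                 factors[n] = 1
--             break
--     return factors
--
-- def divisors(n, proper = False):
--
--     pf = prime_factors(n)
--     primes = [x for x in pf]
--     l = len(primes)
--
--     def gen(n = 0):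
--         if n == l:
--             return [1]
--         else:
--             pows = [1]
--             p = primes[n]
--             for _ in range(pf[p]):
--                 pows.append(pows[-1] * p)
--
--             div = []
--             for q in gen(n + 1):
--                 for p in pows:
--                     div.append(q * p)
--             return div
--
--     div = gen()
--     if proper:
--         div.pop(-1)
--         return div
--     return div
--
-- def S1(p, m):
--     total = 0
--     for s in range(1, p):
--         for d in divisors(s):
--             k = d + s
--             if k <= p:
--                 total += (d*(2*m + d - 2*s + 1))//2
--     return total
-- ===== SOURCE B (Python) =====
-- def S1(p, m):
--     # Divisor sieve: iterate over each divisor d and its multiples s directly,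
--     # instead of factorizing every s to enumerate its divisors.
--     total = 0
--     for d in range(1, p):
--         for s in range(d, p - d + 1, d):
--             total += (d * (2 * m + d - 2 * s + 1)) // 2
--     return total
-- ===== Notes on version B (the rewrite author's own statement) =====
-- stated objective: faster
-- what changed: Replaces per-s prime factorization plus recursive divisor enumeration with a divisor sieve: each d is iterated directly over its multiples s = d, 2d, ... <= p - d, so no factorization happens at all.
import Mathlib
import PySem

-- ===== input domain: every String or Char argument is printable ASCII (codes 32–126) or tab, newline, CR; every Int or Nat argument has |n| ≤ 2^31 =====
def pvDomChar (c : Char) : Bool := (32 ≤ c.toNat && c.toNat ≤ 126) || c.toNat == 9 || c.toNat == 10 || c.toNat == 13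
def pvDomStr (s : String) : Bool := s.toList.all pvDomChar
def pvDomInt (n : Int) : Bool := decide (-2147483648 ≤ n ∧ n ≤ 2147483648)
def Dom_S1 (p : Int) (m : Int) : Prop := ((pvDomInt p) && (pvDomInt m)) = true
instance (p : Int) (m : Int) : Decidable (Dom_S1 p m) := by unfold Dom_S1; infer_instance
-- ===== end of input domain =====

-- B replaces A's per-s factorization + recursive divisor enumeration by a divisor sieve
-- (each d runs over its own multiples); objective: faster.

-- ===== PORT A =====

-- inner while of prime_factors: divide n by d while divisible, counting divisions in the dict.
-- (the extra conjuncts 2 ≤ d ∧ 2 ≤ n in the test are totality guards: every call reached from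
--  prime_factors has d ≥ 2, and then the Python test n % d == 0 on a reachable n ≥ 1 already
--  implies 2 ≤ n. The Nat argument is fuel, another totality guard: n strictly decreases on
--  every iteration so n.toNat iterations always suffice; the fuel-0 branch is never reached
--  from prime_factors — pfInner_spec below proves the loop's exact behaviour.)
def pfInner : ℕ → Int → Int → PySem.Dict Int Int → Int × PySem.Dict Int Int
  | 0, n, _, f => (n, f)
  | fuel+1, n, d, f =>
    if PySem.Int.mod n d = 0 ∧ 2 ≤ d ∧ 2 ≤ n then
      let f' := if f.contains d then f.insert d (f.getD d 0 + 1) else f.insert d 1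
      pfInner fuel (PySem.Int.floordiv n d) d f'
    else (n, f)

-- outer while of prime_factors. Fuel again: d grows by 1 each iteration and the loop only
-- continues while (d+1)^2 ≤ n, so n.toNat + 1 iterations always suffice.

-- outer while of prime_factors (guard 2 ≤ d as above; fuel: d grows by 1 each iteration and
-- the loop only continues while (d+1)^2 ≤ n, so n.toNat + 1 iterations always suffice)
def pfOuter : ℕ → Int → Int → PySem.Dict Int Int → PySem.Dict Int Int
  | 0, _, _, f => f
  | fuel+1, n, d, f =>
    if 1 < n ∧ 2 ≤ d then
      let r := pfInner n.toNat n d f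
      let d' := d + 1
      if d' * d' > r.1 then (if 1 < r.1 then r.2.insert r.1 1 else r.2) else pfOuter fuel r.1 d' r.2
    else f

def prime_factors (n : Int) : PySem.Dict Int Int := pfOuter (n.toNat + 1) n 2 PySem.Dict.empty

-- pows = [1]; for _ in range(pf[p]): pows.append(pows[-1] * p)
def powsA (p e : Int) : List Int :=
  (PySem.List.pyRange 0 e 1).foldl (fun pows _ => pows ++ [pows.getLast! * p]) [1]

-- gen(n): recursion over the suffix of the dict's (prime, exponent) items starting at index n
-- (primes[n] and pf[primes[n]] are exactly the two components of the n-th item; keys are unique)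
def genA : List (Int × Int) → List Int
  | [] => [1]
  | (p, e) :: rest =>
    let pows := powsA p e
    (genA rest).foldl (fun div q => pows.foldl (fun div pw => div ++ [q * pw]) div) []

def divisorsA (n : Int) (proper : Bool) : List Int :=
  let pf := prime_factors n
  let div := genA pf.items
  -- div.pop(-1) removes the last element (gen's result is never empty, so it never raises)
  if proper then div.dropLast else div

def S1 (p : Int) (m : Int) : Int :=
  (PySem.List.pyRange 1 p 1).foldl (fun total s =>
    (divisorsA s false).foldl (fun total d =>
      if d + s ≤ p then total + PySem.Int.floordiv (d * (2*m + d - 2*s + 1)) 2 else total) total) 0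

-- ===== PORT B =====

def S1_alt (p : Int) (m : Int) : Int :=
  (PySem.List.pyRange 1 p 1).foldl (fun total d =>
    (PySem.List.pyRange d (p - d + 1) d).foldl (fun total s =>
      total + PySem.Int.floordiv (d * (2*m + d - 2*s + 1)) 2) total) 0

-- ===== PRECONDITION & SPEC =====
def Spec_S1 (p : Int) (m : Int) (out : Int) : Prop := out = S1_alt p m
instance (p : Int) (m : Int) (out : Int) : Decidable (Spec_S1 p m out) := by unfold Spec_S1; infer_instance

-- ===== CLAIM (what is proved, stated in full; the proofs are below) =====
def Claim_equal_S1 : Prop := ∀ (p : Int) (m : Int), Dom_S1 p m → Spec_S1 p m (S1 p m)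

-- ===== LEMMAS AND PROOFS =====

def ft (m d s : Int) : Int := PySem.Int.floordiv (d * (2*m + d - 2*s + 1)) 2

def NVal (L : List (Int × Int)) : ℕ := (L.map (fun pe => pe.1.toNat ^ pe.2.toNat)).prod

theorem pfInner_dec (n d : Int) (h : PySem.Int.mod n d = 0 ∧ 2 ≤ d ∧ 2 ≤ n) :
    1 ≤ PySem.Int.floordiv n d ∧ PySem.Int.floordiv n d < n := by
  have hdn : d ≤ n := Int.le_of_dvd (by omega) ((PySem.Int.mod_eq_zero_iff_dvd n d).mp h.1)
  constructor
  · exact (PySem.Int.le_floordiv_iff_mul_le (by omega)).mpr (by omega)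
  · exact (PySem.Int.floordiv_lt_iff_lt_mul (by omega)).mpr (by nlinarith [h.2.1, h.2.2])

theorem pfInner_spec (fuel : ℕ) (n d : Int) (f : PySem.Dict Int Int) (hd : 2 ≤ d) (hn : 1 ≤ n)
    (hfuel : n.toNat ≤ fuel + 1) :
    ∃ k : ℕ, ¬ d ∣ (pfInner fuel n d f).1 ∧ n = d ^ k * (pfInner fuel n d f).1 ∧
      1 ≤ (pfInner fuel n d f).1 ∧ (pfInner fuel n d f).1 ≤ n ∧
      (pfInner fuel n d f).2 = (if k = 0 then f else f.insert d (f.getD d 0 + k)) := by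
  induction fuel generalizing n f with
  | zero =>
      refine ⟨0, ?_, by simp [pfInner], by simp [pfInner]; omega, by simp [pfInner]⟩
      simp only [pfInner]
      intro hdvd
      -- n.toNat ≤ 1 forces n = 1, and d ∤ 1 for d ≥ 2
      have hn1 : n = 1 := by omega
      subst hn1
      have := Int.le_of_dvd (by omega) hdvd
      omega
  | succ fuel ih =>
      by_cases hcond : PySem.Int.mod n d = 0 ∧ 2 ≤ d ∧ 2 ≤ n
      · have hdec := pfInner_dec n d hcond
        have hres : pfInner (fuel+1) n d f =
            pfInner fuel (PySem.Int.floordiv n d)  d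
              (if f.contains d then f.insert d (f.getD d 0 + 1) else f.insert d 1) := by
          simp only [pfInner, if_pos hcond]
        set fp := (if f.contains d then f.insert d (f.getD d 0 + 1) else f.insert d 1) with hfp
        obtain ⟨k, hk1, hk2, hk3, hk4, hk5⟩ :=
          ih (PySem.Int.floordiv n d) fp (by omega) (by omega)
        have hfd : d * PySem.Int.floordiv n d = n := by
          have h1 := PySem.Int.floordiv_mul_add_mod n d
          have h2 : PySem.Int.mod n d = 0 := hcond.1
          linarith
        rw [hres]
        refine ⟨k + 1, hk1, ?_, by omega, by nlinarith [hk4, hdec.2], ?_⟩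
        · rw [pow_succ]
          calc n = d * PySem.Int.floordiv n d := hfd.symm
            _ = d * (d ^ k * (pfInner fuel (PySem.Int.floordiv n d) d fp).1) := by rw [← hk2]
            _ = d ^ k * d * (pfInner fuel (PySem.Int.floordiv n d) d fp).1 := by ring
        · rw [hk5, if_neg (by omega : ¬ (k + 1 = 0))]
          by_cases hc : f.contains d = true
          · have hfp' : fp = f.insert d (f.getD d 0 + 1) := by simp [hfp, hc]
            rw [hfp']
            split_ifs with h1
            · subst h1; norm_num
            · rw [PySem.Dict.insert_insert_self, PySem.Dict.getD_insert_self]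
              congr 1
              push_cast
              ring
          · have hfp' : fp = f.insert d 1 := by simp [hfp, hc]
            have hg : f.getD d 0 = 0 := PySem.Dict.getD_of_not_contains _ _ (by simpa using hc)
            rw [hfp']
            split_ifs with h1
            · subst h1; rw [hg]; norm_num
            · rw [PySem.Dict.insert_insert_self, PySem.Dict.getD_insert_self, hg]
              congr 1
              push_cast
              ring
      · have hres : pfInner (fuel+1) n d f = (n, f) := by
          simp only [pfInner, if_neg hcond]
        rw [hres]
        refine ⟨0, ?_, by simp, by simpa using hn, by simp, by simp⟩
        simp only
        intro hdvd
        have hn1 : n = 1 := by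
          rcases not_and.mp hcond ((PySem.Int.mod_eq_zero_iff_dvd n d).mpr hdvd) with h'
          omega
        subst hn1
        have := Int.le_of_dvd (by omega) hdvd
        omega

theorem prime_of_no_small_divisors (x : Int) (h2 : 2 ≤ x)
    (h : ∀ c : Int, 2 ≤ c → c < x → ¬ c ∣ x) : Nat.Prime x.toNat := by
  rw [Nat.prime_def_lt']
  refine ⟨by omega, fun mm h2m hlt hdvd => ?_⟩
  refine h ↑mm (by exact_mod_cast h2m) (by omega) ?_
  have : (mm : ℤ) ∣ ↑x.toNat := Int.natCast_dvd_natCast.mpr hdvd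
  rwa [Int.toNat_of_nonneg (by omega)] at this

-- x ≥ 2 below b² with no divisor in [2, b) is prime

theorem prime_of_lt_sq (x b : Int) (h2 : 2 ≤ x) (hb : 1 ≤ b) (hlt : x < b * b)
    (h : ∀ c : Int, 2 ≤ c → c < b → ¬ c ∣ x) : Nat.Prime x.toNat := by
  apply prime_of_no_small_divisors x h2
  intro c hc2 hcx hdvd
  by_cases hcb : c < b
  · exact h c hc2 hcb hdvd
  · obtain ⟨w, hw⟩ := hdvd
    have hw1 : 1 ≤ w := by nlinarith
    have hw2 : 2 ≤ w := by
      rcases eq_or_lt_of_le hw1 with h1 | h1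
      · exfalso; rw [← h1, mul_one] at hw; omega
      · omega
    have hwb : w < b := by nlinarith
    exact h w hw2 hwb ⟨c, by linarith [hw]⟩

theorem not_contains_of_keys_lt (f : PySem.Dict Int Int) (d : Int)
    (hk : ∀ pe ∈ f.items, pe.1 < d) : f.contains d = false := by
  by_contra hcon
  have hc : f.contains d = true := by revert hcon; cases f.contains d <;> simp
  have hmem : d ∈ f.keys := (PySem.Dict.contains_iff_mem_keys f d).mp hc
  simp only [PySem.Dict.keys, List.mem_map] at hmem
  obtain ⟨pe, hpe, hfst⟩ := hmem
  have := hk pe hpe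
  omega

theorem NVal_append_singleton (L : List (Int × Int)) (p e : Int) :
    NVal (L ++ [(p, e)]) = NVal L * p.toNat ^ e.toNat := by
  simp [NVal]

theorem inner_pack (n d : Int) (f : PySem.Dict Int Int)
    (h1 : 1 < n) (hd : 2 ≤ d)
    (hnd : ∀ c : Int, 2 ≤ c → c < d → ¬ c ∣ n)
    (hkeys : ∀ pe ∈ f.items, 2 ≤ pe.1 ∧ pe.1 < d ∧ Nat.Prime pe.1.toNat ∧ 1 ≤ pe.2)
    (hpw : f.items.Pairwise (fun a b => a.1 < b.1)) :
    1 ≤ (pfInner n.toNat n d f).1 ∧ (pfInner n.toNat n d f).1 ≤ n ∧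
    (∀ c : Int, 2 ≤ c → c < d + 1 → ¬ c ∣ (pfInner n.toNat n d f).1) ∧
    (∀ pe ∈ (pfInner n.toNat n d f).2.items, 2 ≤ pe.1 ∧ pe.1 < d + 1 ∧ Nat.Prime pe.1.toNat ∧ 1 ≤ pe.2) ∧
    (pfInner n.toNat n d f).2.items.Pairwise (fun a b => a.1 < b.1) ∧
    NVal (pfInner n.toNat n d f).2.items * (pfInner n.toNat n d f).1.toNat = NVal f.items * n.toNat := by
  obtain ⟨k, hk1, hk2, hk3, hk4, hk5⟩ := pfInner_spec n.toNat n d f hd (by omega) (by omega)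
  set r := pfInner n.toNat n d f with hr
  have hrdvd : r.1 ∣ n := ⟨d ^ k, by rw [hk2]; ring⟩
  have hnodiv : ∀ c : Int, 2 ≤ c → c < d + 1 → ¬ c ∣ r.1 := by
    intro c hc2 hcd hcdvd
    rcases eq_or_lt_of_le (by omega : c ≤ d) with hcd' | hcd'
    · exact hk1 (hcd' ▸ hcdvd)
    · exact hnd c hc2 hcd' (hcdvd.trans hrdvd)
  have hnat : n.toNat = d.toNat ^ k * r.1.toNat := by
    have hcast : ((d.toNat ^ k * r.1.toNat : ℕ) : ℤ) = n := by
      push_cast [Int.toNat_of_nonneg (by omega : (0:ℤ) ≤ r.1), Int.toNat_of_nonneg (by omega : (0:ℤ) ≤ d)]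
      rw [hk2]
    omega
  by_cases hk0 : k = 0
  · subst hk0
    rw [if_pos rfl] at hk5
    rw [hk5]
    refine ⟨hk3, hk4, hnodiv, fun pe hpe => ?_, hpw, ?_⟩
    · have := hkeys pe hpe; exact ⟨this.1, by omega, this.2.2.1, this.2.2.2⟩
    · rw [hnat]; simp
  · rw [if_neg hk0] at hk5
    have hfresh : f.contains d = false := not_contains_of_keys_lt f d (fun pe hpe => (hkeys pe hpe).2.1)
    have hg0 : f.getD d 0 = 0 := PySem.Dict.getD_of_not_contains _ _ hfresh
    have hitems : r.2.items = f.items ++ [(d, (k : ℤ))] := by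
      rw [hk5, hg0]
      rw [PySem.Dict.items_insert_of_not_contains _ _ hfresh]
      norm_num
    have hddvd : d ∣ n := by
      have hpow : d ^ k = d * d ^ (k - 1) := by
        conv_lhs => rw [show k = (k - 1) + 1 from by omega]
        rw [pow_succ]; ring
      exact ⟨d ^ (k - 1) * r.1, by rw [hk2, hpow]; ring⟩
    have hdprime : Nat.Prime d.toNat := by
      apply prime_of_no_small_divisors d hd
      intro c hc2 hcd hcdvd
      exact hnd c hc2 hcd (hcdvd.trans hddvd)
    refine ⟨hk3, hk4, hnodiv, ?_, ?_, ?_⟩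
    · intro pe hpe
      rw [hitems] at hpe
      rcases List.mem_append.mp hpe with hpe | hpe
      · have := hkeys pe hpe; exact ⟨this.1, by omega, this.2.2.1, this.2.2.2⟩
      · simp at hpe
        subst hpe
        refine ⟨by omega, by omega, hdprime, ?_⟩
        show (1:ℤ) ≤ (k:ℤ)
        exact_mod_cast Nat.one_le_iff_ne_zero.mpr hk0
    · rw [hitems]
      rw [List.pairwise_append]
      refine ⟨hpw, List.pairwise_singleton _ _, ?_⟩
      intro a ha b hb
      simp at hb
      subst hb
      exact (hkeys a ha).2.1
    · rw [hitems, NVal_append_singleton, hnat, Int.toNat_natCast]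
      ring

theorem pfOuter_spec (fuel : ℕ) (n d : Int) (f : PySem.Dict Int Int) :
    1 ≤ n → 2 ≤ d → n.toNat + 2 ≤ fuel + d.toNat →
    (∀ c : Int, 2 ≤ c → c < d → ¬ c ∣ n) →
    (∀ pe ∈ f.items, 2 ≤ pe.1 ∧ pe.1 < d ∧ Nat.Prime pe.1.toNat ∧ 1 ≤ pe.2) →
    f.items.Pairwise (fun a b => a.1 < b.1) →
    (∀ pe ∈ (pfOuter fuel n d f).items, 2 ≤ pe.1 ∧ Nat.Prime pe.1.toNat ∧ 1 ≤ pe.2) ∧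
    (pfOuter fuel n d f).items.Pairwise (fun a b => a.1 < b.1) ∧
    NVal (pfOuter fuel n d f).items = NVal f.items * n.toNat := by
  induction fuel generalizing n d f with
  | zero =>
      intro hn hd hfuel hnd hkeys hpw
      have hn1 : n = 1 := by
        by_contra hne
        -- n ≥ 2 but n < d, yet n ∣ n and every c with 2 ≤ c < d does not divide n
        exact hnd n (by omega) (by omega) dvd_rfl
      subst hn1
      simp only [pfOuter]
      refine ⟨fun pe hpe => ?_, hpw, by norm_num⟩
      have := hkeys pe hpe
      exact ⟨this.1, this.2.2.1, this.2.2.2⟩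
  | succ fuel ih =>
      intro hn hd hfuel hnd hkeys hpw
      by_cases hcond : 1 < n ∧ 2 ≤ d
      · have hres : pfOuter (fuel+1) n d f =
            (if (d+1) * (d+1) > (pfInner n.toNat n d f).1 then
              (if 1 < (pfInner n.toNat n d f).1 then
                (pfInner n.toNat n d f).2.insert (pfInner n.toNat n d f).1 1
              else (pfInner n.toNat n d f).2)
            else pfOuter fuel (pfInner n.toNat n d f).1 (d+1) (pfInner n.toNat n d f).2) := by
          simp only [pfOuter, if_pos hcond]
        obtain ⟨hp1, hp1b, hp2, hp3, hp4, hp5⟩ := inner_pack n d f hcond.1 hd hnd hkeys hpw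
        set r := pfInner n.toNat n d f with hrdef
        rw [hres]
        by_cases hgt : (d+1) * (d+1) > r.1
        · rw [if_pos hgt]
          by_cases hr1 : 1 < r.1
          · rw [if_pos hr1]
            have hrd : d + 1 ≤ r.1 := by
              by_contra hlt
              exact hp2 r.1 (by omega) (by omega) dvd_rfl
            have hfree : r.2.contains r.1 = false :=
              not_contains_of_keys_lt r.2 r.1 (fun pe hpe => by have := (hp3 pe hpe).2.1; omega)
            have hprime : Nat.Prime r.1.toNat :=
              prime_of_lt_sq r.1 (d+1) (by omega) (by omega) (by omega) hp2
            have hitems : (r.2.insert r.1 1).items = r.2.items ++ [(r.1, 1)] :=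
              PySem.Dict.items_insert_of_not_contains _ _ hfree
            refine ⟨?_, ?_, ?_⟩
            · intro pe hpe
              rw [hitems] at hpe
              rcases List.mem_append.mp hpe with hpe | hpe
              · have := hp3 pe hpe; exact ⟨this.1, this.2.2.1, this.2.2.2⟩
              · simp at hpe; subst hpe
                exact ⟨by omega, hprime, by norm_num⟩
            · rw [hitems, List.pairwise_append]
              refine ⟨hp4, List.pairwise_singleton _ _, ?_⟩
              intro a ha b hb
              simp at hb; subst hb
              have := (hp3 a ha).2.1
              omega
            · rw [hitems, NVal_append_singleton, ← hp5]
              norm_num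
          · rw [if_neg hr1]
            have h1 : r.1 = 1 := by omega
            refine ⟨fun pe hpe => ?_, hp4, ?_⟩
            · have := hp3 pe hpe; exact ⟨this.1, this.2.2.1, this.2.2.2⟩
            · rw [← hp5, h1]
              norm_num
        · rw [if_neg hgt]
          have hsq : (d+1) * (d+1) ≤ r.1 := by omega
          have hd1r : d + 1 ≤ r.1 := by nlinarith
          obtain ⟨hq1, hq2, hq3⟩ := ih r.1 (d+1) r.2 (by omega) (by omega) (by omega) hp2 hp3 hp4
          exact ⟨hq1, hq2, hq3.trans hp5⟩
      · have hres : pfOuter (fuel+1) n d f = f := by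
          simp only [pfOuter, if_neg hcond]
        rw [hres]
        have hn1 : n = 1 := by omega
        subst hn1
        refine ⟨fun pe hpe => ?_, hpw, by norm_num⟩
        have := hkeys pe hpe
        exact ⟨this.1, this.2.2.1, this.2.2.2⟩

theorem prime_factors_spec (n : Int) (hn : 1 ≤ n) :
    (∀ pe ∈ (prime_factors n).items, 2 ≤ pe.1 ∧ Nat.Prime pe.1.toNat ∧ 1 ≤ pe.2) ∧
    (prime_factors n).items.Pairwise (fun a b => a.1 < b.1) ∧
    NVal (prime_factors n).items = n.toNat := by
  have h := pfOuter_spec (n.toNat + 1) n 2 PySem.Dict.empty hn (by omega) (by omega)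
    (by intro c hc2 hcd; omega)
    (by intro pe hpe; simp [PySem.Dict.empty] at hpe)
    (by simp [PySem.Dict.empty])
  refine ⟨h.1, h.2.1, ?_⟩
  have := h.2.2
  simpa [NVal, PySem.Dict.empty] using this

theorem powsA_eq (p : Int) (a : ℕ) : powsA p (a : Int) = (List.range (a+1)).map (p ^ ·) := by
  induction a with
  | zero => simp [powsA, PySem.List.pyRange_one_eq_nil (by omega : (0:ℤ) ≤ 0)]
  | succ k ih =>
      have hsplit : PySem.List.pyRange 0 ((k+1 : ℕ) : ℤ) 1 =
          PySem.List.pyRange 0 ((k : ℕ) : ℤ) 1 ++ [(k : ℤ)] := by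
        have := PySem.List.pyRange_one_succ_right (a := 0) (b := (k : ℤ)) (by omega)
        rw [show ((k+1 : ℕ) : ℤ) = (k : ℤ) + 1 by push_cast; ring]
        exact this
      unfold powsA
      rw [hsplit, List.foldl_append]
      have ihe : (PySem.List.pyRange 0 ((k : ℕ) : ℤ) 1).foldl
          (fun pows _ => pows ++ [pows.getLast! * p]) [1] = (List.range (k+1)).map (p ^ ·) := ih
      rw [ihe]
      simp only [List.foldl_cons, List.foldl_nil]
      have hlast : ((List.range (k+1)).map (p ^ ·)).getLast! = p ^ k := by
        rw [List.range_succ, List.map_append]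
        exact List.getLast!_of_getLast? (List.getLast?_concat ..)
      rw [hlast, List.range_succ (n := k+1), List.map_append]
      simp [pow_succ]

theorem genA_cons (p e : Int) (t : List (Int × Int)) :
    genA ((p, e) :: t) = (genA t).flatMap (fun q => (powsA p e).map (q * ·)) := by
  show (genA t).foldl (fun div q => (powsA p e).foldl (fun div pw => div ++ [q * pw]) div) [] = _
  calc (genA t).foldl (fun div q => (powsA p e).foldl (fun div pw => div ++ [q * pw]) div) []
      = (genA t).foldl (fun div q => div ++ (powsA p e).map (q * ·)) [] :=
        by apply PySem.List.foldl_congr_mem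
           intro acc x _
           exact PySem.List.foldl_append_singleton_eq_map ..
    _ = [] ++ (genA t).flatMap (fun q => (powsA p e).map (q * ·)) :=
        PySem.List.foldl_append_eq_flatMap ..
    _ = (genA t).flatMap (fun q => (powsA p e).map (q * ·)) := by simp

theorem toNat_mul_pow (q p : ℤ) (i : ℕ) (hq : 0 ≤ q) (hp : 0 ≤ p) :
    (q * p ^ i).toNat = q.toNat * p.toNat ^ i := by
  have h : ((q.toNat * p.toNat ^ i : ℕ) : ℤ) = q * p ^ i := by
    push_cast [Int.toNat_of_nonneg hq, Int.toNat_of_nonneg hp]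
    ring
  omega

theorem pp_cancel (P : ℕ) (hP : 2 ≤ P) : ∀ (i j q q' : ℕ), ¬ P ∣ q → ¬ P ∣ q' →
    q * P ^ i = q' * P ^ j → i = j ∧ q = q' := by
  intro i
  induction i with
  | zero =>
      intro j q q' hq hq' h
      cases j with
      | zero => simpa using h
      | succ j' =>
          exfalso; apply hq
          exact ⟨q' * P ^ j', by rw [pow_succ] at h; simpa [mul_assoc] using h.trans (by ring)⟩
  | succ i' ih =>
      intro j q q' hq hq' h
      cases j with
      | zero =>
          exfalso; apply hq'
          exact ⟨q * P ^ i', by rw [pow_succ] at h; simpa [mul_assoc] using h.symm.trans (by ring)⟩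
      | succ j' =>
          rw [pow_succ, pow_succ, ← mul_assoc, ← mul_assoc] at h
          obtain ⟨h1, h2⟩ := ih j' q q' hq hq' (Nat.eq_of_mul_eq_mul_right (by omega) h)
          exact ⟨by omega, h2⟩

theorem NVal_cons (pe : Int × Int) (t : List (Int × Int)) :
    NVal (pe :: t) = pe.1.toNat ^ pe.2.toNat * NVal t := by simp [NVal]

theorem NVal_pos (t : List (Int × Int)) (ht : ∀ pe ∈ t, 2 ≤ pe.1) : 0 < NVal t := by
  induction t with
  | nil => simp [NVal]
  | cons a t ih =>
      rw [NVal_cons]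
      have ha := ht a List.mem_cons_self
      have : 0 < a.1.toNat := by omega
      exact Nat.mul_pos (Nat.pow_pos this) (ih (fun pe hpe => ht pe (List.mem_cons_of_mem a hpe)))

theorem coprime_NVal (P : ℕ) (hP : Nat.Prime P) (t : List (Int × Int))
    (ht : ∀ pe ∈ t, Nat.Prime pe.1.toNat)
    (hne : ∀ pe ∈ t, pe.1.toNat ≠ P) : Nat.Coprime P (NVal t) := by
  induction t with
  | nil => simp [NVal]
  | cons a t ih =>
      rw [NVal_cons]
      apply Nat.Coprime.mul_right
      · exact ((Nat.coprime_primes hP (ht a List.mem_cons_self)).mpr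
          (Ne.symm (hne a List.mem_cons_self))).pow_right _
      · exact ih (fun pe hpe => ht pe (List.mem_cons_of_mem a hpe))
          (fun pe hpe => hne pe (List.mem_cons_of_mem a hpe))

theorem genA_spec (L : List (Int × Int))
    (hent : ∀ pe ∈ L, 2 ≤ pe.1 ∧ Nat.Prime pe.1.toNat ∧ 1 ≤ pe.2)
    (hpw : L.Pairwise (fun a b => a.1 < b.1)) :
    (genA L).Nodup ∧ ∀ x : Int, x ∈ genA L ↔ 0 < x ∧ x.toNat ∣ NVal L := by
  induction L with
  | nil =>
      refine ⟨by simp [genA], fun x => ?_⟩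
      simp only [genA, List.mem_singleton, NVal, List.map_nil, List.prod_nil, Nat.dvd_one]
      omega
  | cons pe t ih =>
      obtain ⟨p, e⟩ := pe
      have hp2 : 2 ≤ p := (hent _ List.mem_cons_self).1
      have hpp : Nat.Prime p.toNat := (hent _ List.mem_cons_self).2.1
      have he1 : 1 ≤ e := (hent _ List.mem_cons_self).2.2
      have hentt : ∀ pe ∈ t, 2 ≤ pe.1 ∧ Nat.Prime pe.1.toNat ∧ 1 ≤ pe.2 :=
        fun pe hpe => hent pe (List.mem_cons_of_mem _ hpe)
      have hpwt : t.Pairwise (fun a b => a.1 < b.1) := (List.pairwise_cons.mp hpw).2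
      obtain ⟨ihn, ihm⟩ := ih hentt hpwt
      have hM : 0 < NVal t := NVal_pos t (fun pe hpe => (hentt pe hpe).1)
      have hcop : Nat.Coprime p.toNat (NVal t) := by
        apply coprime_NVal _ hpp t (fun pe hpe => (hentt pe hpe).2.1)
        intro pe hpe
        have hlt : p < pe.1 := (List.pairwise_cons.mp hpw).1 pe hpe
        omega
      have hnotdvd : ∀ q : ℤ, q ∈ genA t → ¬ (p.toNat ∣ q.toNat) := by
        intro q hq hdvd
        have hqd := (ihm q).mp hq
        have : p.toNat ∣ Nat.gcd p.toNat (NVal t) := Nat.dvd_gcd dvd_rfl (hdvd.trans hqd.2)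
        rw [hcop] at this
        have := Nat.le_of_dvd (by omega) this
        have := hpp.two_le
        omega
      have hpows : powsA p e = (List.range (e.toNat + 1)).map (p ^ ·) := by
        have he : ((e.toNat : ℕ) : ℤ) = e := Int.toNat_of_nonneg (by omega)
        have h2 := powsA_eq p e.toNat
        rwa [he] at h2
      have hNc : NVal ((p, e) :: t) = p.toNat ^ e.toNat * NVal t := NVal_cons _ _
      have hmem : ∀ x : Int, x ∈ genA ((p, e) :: t) ↔
          ∃ q ∈ genA t, ∃ i ≤ e.toNat, x = q * p ^ i := by
        intro x
        rw [genA_cons, List.mem_flatMap]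
        constructor
        · rintro ⟨q, hq, hx⟩
          simp only [hpows, List.map_map, List.mem_map, Function.comp, List.mem_range,
            Nat.lt_succ_iff] at hx
          obtain ⟨i, hi, hxe⟩ := hx
          exact ⟨q, hq, i, hi, hxe.symm⟩
        · rintro ⟨q, hq, i, hi, hxe⟩
          refine ⟨q, hq, ?_⟩
          simp only [hpows, List.map_map, List.mem_map, Function.comp, List.mem_range,
            Nat.lt_succ_iff]
          exact ⟨i, hi, hxe.symm⟩
      constructor
      · -- Nodup
        rw [genA_cons, List.nodup_flatMap]
        constructor
        · intro q hq
          have hq0 : 0 < q := ((ihm q).mp hq).1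
          rw [hpows, List.map_map]
          apply List.Nodup.map _ (List.nodup_range)
          intro i j hij
          simp only [Function.comp] at hij
          have : p ^ i = p ^ j := by
            have := mul_left_cancel₀ (by omega : q ≠ 0) hij
            exact this
          have hN : p.toNat ^ i = p.toNat ^ j := by
            have e1 : ((1:ℤ) * p ^ i).toNat = (1:ℤ).toNat * p.toNat ^ i :=
              toNat_mul_pow 1 p i (by omega) (by omega)
            have e2 : ((1:ℤ) * p ^ j).toNat = (1:ℤ).toNat * p.toNat ^ j :=
              toNat_mul_pow 1 p j (by omega) (by omega)
            simp only [one_mul, Int.toNat_one] at e1 e2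
            rw [← e1, ← e2, this]
          exact Nat.pow_right_injective (by omega) hN
        · apply List.Pairwise.imp_of_mem _ ihn
          intro q q' hq hq' hne
          intro x hx hx'
          simp only [hpows, List.map_map, List.mem_map, Function.comp, List.mem_range] at hx hx'
          obtain ⟨i, hi, hxe⟩ := hx
          obtain ⟨j, hj, hxe'⟩ := hx'
          have hq0 : 0 < q := ((ihm q).mp hq).1
          have hq0' : 0 < q' := ((ihm q').mp hq').1
          have heq : q * p ^ i = q' * p ^ j := hxe.trans hxe'.symm
          have hnat : q.toNat * p.toNat ^ i = q'.toNat * p.toNat ^ j := by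
            rw [← toNat_mul_pow q p i (by omega) (by omega),
                ← toNat_mul_pow q' p j (by omega) (by omega), heq]
          obtain ⟨_, h2⟩ := pp_cancel p.toNat (by omega) i j q.toNat q'.toNat
            (hnotdvd q hq) (hnotdvd q' hq') hnat
          apply hne
          omega
      · -- membership
        intro x
        rw [hmem, hNc]
        constructor
        · rintro ⟨q, hq, i, hi, hxe⟩
          obtain ⟨hq0, hqd⟩ := (ihm q).mp hq
          have hx0 : 0 < x := by
            rw [hxe]
            positivity
          refine ⟨hx0, ?_⟩
          rw [hxe, toNat_mul_pow q p i (by omega) (by omega)]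
          exact dvd_trans (Nat.mul_dvd_mul hqd (pow_dvd_pow _ hi)) (dvd_of_eq (Nat.mul_comm _ _))
        · rintro ⟨hx0, hxd⟩
          obtain ⟨y, z, hy, hz, hyz⟩ := dvd_mul.mp hxd
          obtain ⟨i, hi, hyp⟩ := (Nat.dvd_prime_pow hpp).mp hy
          have hz0 : 0 < z := Nat.pos_of_dvd_of_pos hz hM
          refine ⟨(z : ℤ), (ihm _).mpr ⟨by exact_mod_cast hz0, by simp [hz]⟩, i, hi, ?_⟩
          have : ((z * p.toNat ^ i : ℕ) : ℤ) = (z : ℤ) * p ^ i := by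
            push_cast [Int.toNat_of_nonneg (by omega : (0:ℤ) ≤ p)]
            ring
          rw [← this, ← hyp]
          have hxx : x.toNat = z * y := by rw [hyz]; ring
          rw [← hxx, Int.toNat_of_nonneg (by omega)]

theorem divA_spec (s : Int) (hs : 1 ≤ s) :
    (divisorsA s false).Nodup ∧ ∀ x : Int, x ∈ divisorsA s false ↔ 0 < x ∧ x.toNat ∣ s.toNat := by
  obtain ⟨h1, h2, h3⟩ := prime_factors_spec s hs
  have h := genA_spec (prime_factors s).items h1 h2
  rw [h3] at h
  simpa [divisorsA] using h

theorem sum_divA (s : Int) (hs : 1 ≤ s) (g : Int → Int) :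
    ((divisorsA s false).map g).sum = ∑ dn ∈ s.toNat.divisors, g ↑dn := by
  obtain ⟨hnd, hmem⟩ := divA_spec s hs
  have hfin : (divisorsA s false).toFinset
      = s.toNat.divisors.map ⟨fun n : ℕ => (n : ℤ), fun a b h => Int.natCast_inj.mp h⟩ := by
    ext x
    rw [List.mem_toFinset, hmem x, Finset.mem_map]
    constructor
    · rintro ⟨hx0, hxd⟩
      exact ⟨x.toNat, Nat.mem_divisors.mpr ⟨hxd, by omega⟩, by simp [Int.toNat_of_nonneg, hx0.le]⟩
    · rintro ⟨dn, hdn, hdx⟩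
      obtain ⟨hd1, hd2⟩ := Nat.mem_divisors.mp hdn
      have : 0 < dn := Nat.pos_of_dvd_of_pos hd1 (by omega)
      have hdx' : (dn : ℤ) = x := hdx
      constructor
      · rw [← hdx']; exact_mod_cast this
      · rw [← hdx']; simpa using hd1
  rw [← List.sum_toFinset g hnd, hfin, Finset.sum_map]
  rfl

theorem foldl_ite_add (l : List Int) (P : Int → Prop) [DecidablePred P] (g : Int → Int) (t0 : Int) :
    l.foldl (fun t d => if P d then t + g d else t) t0
      = t0 + (l.map (fun d => if P d then g d else 0)).sum := by
  calc l.foldl (fun t d => if P d then t + g d else t) t0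
      = l.foldl (fun t d => t + (if P d then g d else 0)) t0 := by
        apply PySem.List.foldl_congr_mem
        intro acc x _
        split_ifs <;> simp
    _ = t0 + (l.map (fun d => if P d then g d else 0)).sum := PySem.List.foldl_add ..

theorem sum_map_pyRange_one (a b : Int) (g : Int → Int) :
    ((PySem.List.pyRange a b 1).map g).sum = ∑ k ∈ Finset.range (b - a).toNat, g (a + ↑k) := by
  rw [PySem.List.pyRange_one, List.map_map]
  rfl

theorem S1_list_sum (p m : Int) :
    S1 p m = ((PySem.List.pyRange 1 p 1).map (fun s =>
      ((divisorsA s false).map (fun d => if d + s ≤ p then ft m d s else 0)).sum)).sum := by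
  unfold S1
  calc (PySem.List.pyRange 1 p 1).foldl (fun total s =>
        (divisorsA s false).foldl (fun total d =>
          if d + s ≤ p then total + PySem.Int.floordiv (d * (2*m + d - 2*s + 1)) 2 else total) total) 0
      = (PySem.List.pyRange 1 p 1).foldl (fun total s =>
          total + ((divisorsA s false).map (fun d => if d + s ≤ p then ft m d s else 0)).sum) 0 := by
        apply PySem.List.foldl_congr_mem
        intro acc s _
        exact foldl_ite_add (divisorsA s false) (fun d => d + s ≤ p) (fun d => ft m d s) acc
    _ = 0 + ((PySem.List.pyRange 1 p 1).map (fun s =>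
          ((divisorsA s false).map (fun d => if d + s ≤ p then ft m d s else 0)).sum)).sum :=
        PySem.List.foldl_add ..
    _ = _ := by simp

theorem S1_eq_FS (p m : Int) :
    S1 p m = ∑ x ∈ ((Finset.Ico 1 p.toNat) ×ˢ (Finset.Ico 1 p.toNat)).filter
        (fun y => (↑y.1 + ↑y.1 * ↑y.2 : ℤ) ≤ p),
      ft m ↑x.1 (↑x.1 * ↑x.2) := by
  rw [S1_list_sum, sum_map_pyRange_one]
  have h2 : ∀ k ∈ Finset.range (p-1).toNat,
      ((divisorsA (1 + ↑k) false).map (fun d => if d + (1 + ↑k) ≤ p then ft m d (1 + ↑k) else 0)).sum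
      = ∑ dn ∈ (1+k).divisors, (if ((dn : ℤ) + ↑(1+k)) ≤ p then ft m ↑dn ↑(1+k) else 0) := by
    intro k _
    rw [sum_divA (1 + ↑k) (by omega)]
    have ht : ((1 + (k:ℤ)).toNat) = 1 + k := by omega
    rw [ht]
    apply Finset.sum_congr rfl
    intro dn _
    have : ((1 + k : ℕ) : ℤ) = 1 + (k : ℤ) := by push_cast; ring
    rw [this]
  rw [Finset.sum_congr rfl h2]
  -- range → Ico
  have h3 : ∑ k ∈ Finset.range (p-1).toNat, (∑ dn ∈ (1+k).divisors,
      (if ((dn : ℤ) + ↑(1+k)) ≤ p then ft m ↑dn ↑(1+k) else 0))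
      = ∑ sn ∈ Finset.Ico 1 p.toNat, ∑ dn ∈ sn.divisors,
      (if ((dn : ℤ) + ↑sn) ≤ p then ft m ↑dn ↑sn else 0) := by
    rw [Finset.sum_Ico_eq_sum_range]
    rw [show p.toNat - 1 = (p-1).toNat from by omega]
  rw [h3]
  -- divisors → antidiagonal
  have h4 : ∀ sn ∈ Finset.Ico 1 p.toNat, (∑ dn ∈ sn.divisors,
      (if ((dn : ℤ) + ↑sn) ≤ p then ft m ↑dn ↑sn else 0))
      = ∑ x ∈ sn.divisorsAntidiagonal, (if ((x.1 : ℤ) + ↑sn) ≤ p then ft m ↑x.1 ↑sn else 0) := by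
    intro sn _
    exact (Nat.sum_divisorsAntidiagonal (fun a b => if ((a : ℤ) + ↑sn) ≤ p then ft m ↑a ↑sn else 0)).symm
  rw [Finset.sum_congr rfl h4, Finset.sum_sigma']
  rw [← Finset.sum_filter]
  apply Finset.sum_nbij' (i := fun y => (y.2.1, y.2.2)) (j := fun x => ⟨x.1 * x.2, (x.1, x.2)⟩)
  · intro y hy
    simp only [Finset.mem_filter, Finset.mem_sigma, Finset.mem_Ico,
      Nat.mem_divisorsAntidiagonal] at hy
    obtain ⟨⟨⟨hs1, hs2⟩, hda, hne⟩, hcond⟩ := hy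
    simp only [Finset.mem_filter, Finset.mem_product, Finset.mem_Ico]
    have hd1 : 1 ≤ y.2.1 := by
      rcases Nat.eq_zero_or_pos y.2.1 with h | h
      · exfalso; rw [h] at hda; simp at hda; omega
      · omega
    have hj1 : 1 ≤ y.2.2 := by
      rcases Nat.eq_zero_or_pos y.2.2 with h | h
      · exfalso; rw [h] at hda; simp at hda; omega
      · omega
    refine ⟨⟨⟨hd1, ?_⟩, ⟨hj1, ?_⟩⟩, ?_⟩
    · calc y.2.1 ≤ y.2.1 * y.2.2 := Nat.le_mul_of_pos_right _ hj1
        _ = y.1 := hda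
        _ < p.toNat := hs2
    · calc y.2.2 ≤ y.2.1 * y.2.2 := Nat.le_mul_of_pos_left _ hd1
        _ = y.1 := hda
        _ < p.toNat := hs2
    · have : ((y.2.1 * y.2.2 : ℕ) : ℤ) = (y.1 : ℤ) := by exact_mod_cast hda
      push_cast at this ⊢
      omega
  · intro x hx
    simp only [Finset.mem_filter, Finset.mem_product, Finset.mem_Ico] at hx
    obtain ⟨⟨⟨hd1, hd2⟩, hj1, hj2⟩, hcond⟩ := hx
    simp only [Finset.mem_filter, Finset.mem_sigma, Finset.mem_Ico,
      Nat.mem_divisorsAntidiagonal]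
    have hs1 : 1 ≤ x.1 * x.2 := Nat.mul_pos hd1 hj1
    have hs2 : x.1 * x.2 < p.toNat := by
      have : ((x.1 * x.2 : ℕ) : ℤ) < p := by push_cast at hcond ⊢; omega
      omega
    refine ⟨⟨⟨hs1, hs2⟩, trivial, by omega⟩, by push_cast at hcond ⊢; omega⟩
  · intro y hy
    simp only [Finset.mem_filter, Finset.mem_sigma, Nat.mem_divisorsAntidiagonal] at hy
    obtain ⟨⟨_, hda, _⟩, _⟩ := hy
    exact Sigma.ext (by simpa using hda) (by simp)
  · intro x hx
    rfl
  · intro y hy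
    simp only [Finset.mem_filter, Finset.mem_sigma, Nat.mem_divisorsAntidiagonal] at hy
    obtain ⟨⟨_, hda, _⟩, _⟩ := hy
    simp only
    rw [show ((y.2.1 : ℤ) * (y.2.2 : ℤ)) = ((y.1 : ℕ) : ℤ) from by exact_mod_cast hda]

theorem S1_alt_list_sum (p m : Int) :
    S1_alt p m = ((PySem.List.pyRange 1 p 1).map (fun d =>
      ((PySem.List.pyRange d (p - d + 1) d).map (fun s => ft m d s)).sum)).sum := by
  unfold S1_alt
  calc (PySem.List.pyRange 1 p 1).foldl (fun total d =>
        (PySem.List.pyRange d (p - d + 1) d).foldl (fun total s =>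
          total + PySem.Int.floordiv (d * (2*m + d - 2*s + 1)) 2) total) 0
      = (PySem.List.pyRange 1 p 1).foldl (fun total d =>
          total + ((PySem.List.pyRange d (p - d + 1) d).map (fun s => ft m d s)).sum) 0 := by
        apply PySem.List.foldl_congr_mem
        intro acc d _
        exact PySem.List.foldl_add ..
    _ = 0 + _ := PySem.List.foldl_add ..
    _ = _ := by simp

theorem inner_sieve (p m d : Int) (hd : 1 ≤ d) :
    ((PySem.List.pyRange d (p - d + 1) d).map (fun s => ft m d s)).sum
    = ∑ j ∈ Finset.Ico 1 p.toNat, (if (d + d * ↑j : ℤ) ≤ p then ft m d (d * ↑j) else 0) := by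
  rw [PySem.List.pyRange_of_pos _ _ (by omega : (0:ℤ) < d)]
  set T : ℕ := if d < p - d + 1 then ((p - d + 1 - d + d - 1) / d).toNat else 0 with hT
  have hT' : T = if d < p - d + 1 then ((p - d) / d).toNat else 0 := by
    rw [hT, show p - d + 1 - d + d - 1 = p - d from by ring]
  -- list sum over range T
  have hls : ((List.range T).map (fun k => d + d * ↑k)).map (fun s => ft m d s)
      = (List.range T).map (fun k => ft m d (d + d * ↑k)) := by
    rw [List.map_map]; rfl
  rw [hls]
  have hfs : ((List.range T).map (fun k => ft m d (d + d * ↑k))).sum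
      = ∑ k ∈ Finset.range T, ft m d (d + d * ↑k) := rfl
  rw [hfs]
  -- reindex to Ico 1 (T+1)
  have hri : ∑ j ∈ Finset.Ico 1 (T+1), ft m d (d * ↑j)
      = ∑ k ∈ Finset.range T, ft m d (d + d * ↑k) := by
    rw [Finset.sum_Ico_eq_sum_range]
    simp only [Nat.add_sub_cancel]
    apply Finset.sum_congr rfl
    intro k _
    congr 1
    push_cast
    ring
  rw [← hri]
  -- Ico 1 (T+1) is the filtered square
  have hset : Finset.Ico 1 (T+1)
      = (Finset.Ico 1 p.toNat).filter (fun j : ℕ => (d + d * (j : ℤ) : ℤ) ≤ p) := by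
    ext j
    simp only [Finset.mem_Ico, Finset.mem_filter]
    rw [hT']
    constructor
    · rintro ⟨hj1, hjT⟩
      split_ifs at hjT with hlt
      · have hjT' : (j : ℤ) ≤ (p - d) / d := by
          have h0 : 0 ≤ (p - d) / d := Int.ediv_nonneg (by omega) (by omega)
          omega
        have hmul : (j : ℤ) * d ≤ p - d := (Int.le_ediv_iff_mul_le (by omega)).mp hjT'
        have hcomm : (j : ℤ) * d = d * (j : ℤ) := mul_comm _ _
        have hcond : (d + d * ↑j : ℤ) ≤ p := by linarith [hmul, hcomm.symm.le, hcomm.le]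
        have hjp : (j : ℤ) < p := by nlinarith [hmul]
        exact ⟨⟨hj1, by omega⟩, hcond⟩
      · omega
    · rintro ⟨⟨hj1, hjP⟩, hcond⟩
      have hdj : d ≤ d * (j : ℤ) := by nlinarith
      have hlt : d < p - d + 1 := by omega
      rw [if_pos hlt]
      have hmul : (j : ℤ) * d ≤ p - d := by nlinarith
      have hjT' : (j : ℤ) ≤ (p - d) / d := (Int.le_ediv_iff_mul_le (by omega)).mpr hmul
      have h0 : 0 ≤ (p - d) / d := le_trans (by omega) hjT'
      omega
  rw [hset, Finset.sum_filter]

theorem S1_alt_eq_FS (p m : Int) :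
    S1_alt p m = ∑ x ∈ ((Finset.Ico 1 p.toNat) ×ˢ (Finset.Ico 1 p.toNat)).filter
        (fun y => (↑y.1 + ↑y.1 * ↑y.2 : ℤ) ≤ p),
      ft m ↑x.1 (↑x.1 * ↑x.2) := by
  rw [S1_alt_list_sum, sum_map_pyRange_one]
  have h1 : ∀ k ∈ Finset.range (p-1).toNat,
      ((PySem.List.pyRange (1 + ↑k) (p - (1 + ↑k) + 1) (1 + ↑k)).map (fun s => ft m (1 + ↑k) s)).sum
      = ∑ j ∈ Finset.Ico 1 p.toNat,
          (if ((1 + (k:ℤ)) + (1 + (k:ℤ)) * ↑j : ℤ) ≤ p then ft m (1 + ↑k) ((1 + ↑k) * ↑j) else 0) :=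
    fun k _ => inner_sieve p m (1 + ↑k) (by omega)
  rw [Finset.sum_congr rfl h1]
  have h2 : ∑ k ∈ Finset.range (p-1).toNat, (∑ j ∈ Finset.Ico 1 p.toNat,
      (if ((1 + (k:ℤ)) + (1 + (k:ℤ)) * ↑j : ℤ) ≤ p then ft m (1 + ↑k) ((1 + ↑k) * ↑j) else 0))
      = ∑ dn ∈ Finset.Ico 1 p.toNat, ∑ j ∈ Finset.Ico 1 p.toNat,
      (if ((dn : ℤ) + (dn : ℤ) * ↑j : ℤ) ≤ p then ft m ↑dn (↑dn * ↑j) else 0) := by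
    rw [Finset.sum_Ico_eq_sum_range]
    rw [show p.toNat - 1 = (p-1).toNat from by omega]
    apply Finset.sum_congr rfl
    intro k _
    apply Finset.sum_congr rfl
    intro j _
    have hc : ((1 + k : ℕ) : ℤ) = 1 + (k : ℤ) := by push_cast; ring
    rw [hc]
  rw [h2, ← Finset.sum_product', ← Finset.sum_filter]

-- ===== VERDICT (by name: the statement is the Claim_ definition above) =====
theorem S1_spec : Claim_equal_S1 := by
  intro p m _
  unfold Spec_S1
  rw [S1_eq_FS, S1_alt_eq_FS]
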